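-- pv_equiv track=rewrite | github.com/Abhimanyu20273/Network-Security | Assignment2/AES.py | multiplication_GF28
-- ===== SOURCE A (Python) =====
-- def int_bin(num):
-- 	bin_string = bin(num)[2:]
-- 	while(len(bin_string) != 8):
-- 		bin_string = "0" + bin_string
-- 	return bin_string
--
-- def multiplication_GF28(num1,num2):
-- 	binary1 = int_bin(num1)
-- 	binary2 = int_bin(num2)
-- 	result = 0
-- 	mod_val = 283
-- 	for i in range(7,-1,-1):
-- 		if(binary1[i] == "1"):
-- 			result = result ^ num2
-- 		num2 = num2 << 1
-- 		if(binary2[0] == "1"):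
--
-- 			num2 = num2 ^ mod_val
-- 		binary2 = int_bin(num2)
-- 	return result
-- ===== SOURCE B (Python) =====
-- # GF(2^8) multiplication via log/antilog tables over generator 0x03, poly 0x11B.
-- _EXP = []
-- _LOG = {}
-- _x = 1
-- for _i in range(255):
--     _EXP.append(_x)
--     _LOG[_x] = _i
--     _x ^= _x << 1          # multiply by generator 0x03
--     if _x & 0x100:
--         _x ^= 0x11B        # reduce mod the AES polynomial
-- del _x, _i
--
-- def multiplication_GF28(num1, num2):
--     if num1 == 0 or num2 == 0:
--         return 0
--     return _EXP[(_LOG[num1] + _LOG[num2]) % 255]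
-- ===== Notes on version B (the rewrite author's own statement) =====
-- stated objective: alternative
-- what changed: Replaces A's per-call 8-iteration shift-and-reduce bit loop (with binary-string formatting each iteration) by log/antilog tables over generator 0x03 mod 0x11B built once at module scope; each call is two log lookups, a modular addition and one antilog lookup (measured ~1.2-1.6x on the probe, below the 1.5x confirmation bar, so no speed is claimed).
-- outside the precondition, e.g. on multiplication_GF28(-5, 3): A returns 15, B raises KeyError
import Mathlib
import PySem

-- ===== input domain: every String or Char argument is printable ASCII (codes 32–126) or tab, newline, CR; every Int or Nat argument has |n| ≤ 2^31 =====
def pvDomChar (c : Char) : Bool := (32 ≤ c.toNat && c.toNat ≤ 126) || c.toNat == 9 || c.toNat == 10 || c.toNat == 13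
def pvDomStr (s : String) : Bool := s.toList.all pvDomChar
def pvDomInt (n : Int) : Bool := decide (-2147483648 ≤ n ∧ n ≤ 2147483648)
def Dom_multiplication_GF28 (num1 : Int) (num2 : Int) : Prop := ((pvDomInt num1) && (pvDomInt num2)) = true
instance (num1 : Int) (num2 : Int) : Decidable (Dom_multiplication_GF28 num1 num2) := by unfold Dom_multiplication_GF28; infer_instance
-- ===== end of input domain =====

-- ===== PORT A =====
-- B replaces A's 8-step shift-and-reduce bit loop by log/antilog tables built once (generator 0x03, poly 0x11B); proved equal on bytes 0..255.

-- int_bin: Python's bin(num)[2:] padded with leading '0' while len != 8; the while loop is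
-- fuel-bounded by 8 — identical to Python wherever Python's loop terminates (len ≤ 8, i.e. on Pre_).
def int_bin_pad : Nat → List Char → List Char
  | 0, s => s
  | f+1, s => if s.length ≠ 8 then int_bin_pad f ('0' :: s) else s

def int_bin (num : Int) : List Char :=
  int_bin_pad 8 (PySem.List.slice (PySem.Int.toBinChars0b num) (some 2) none)

-- the body of A's 'for i in range(7,-1,-1)' loop; state = (result, num2, binary2); mod_val = 283
def mulStep (binary1 : List Char) (st : Int × Int × List Char) (i : Int) : Int × Int × List Char :=
  let result := if PySem.List.pyGet? binary1 i = some '1' then PySem.Int.bxor st.1 st.2.1 else st.1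
  let num2 := st.2.1 <<< (1 : Nat)
  let num2 := if PySem.List.pyGet? st.2.2 0 = some '1' then PySem.Int.bxor num2 283 else num2
  (result, num2, int_bin num2)

def multiplication_GF28 (num1 : Int) (num2 : Int) : Int :=
  let binary1 := int_bin num1
  ((PySem.List.pyRange 7 (-1) (-1)).foldl (mulStep binary1) (0, num2, int_bin num2)).1

-- ===== PORT B =====
-- module-scope table build of Source B: state = (_EXP, _LOG, _x), 255 iterations
def gfInit : List Int × PySem.Dict Int Int × Int :=
  (PySem.List.pyRange 0 255 1).foldl
    (fun (st : List Int × PySem.Dict Int Int × Int) i =>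
      let e := st.1 ++ [st.2.2]
      let l := st.2.1.insert st.2.2 i
      let x := PySem.Int.bxor st.2.2 (st.2.2 <<< (1 : Nat))
      let x := if PySem.Int.band x 256 ≠ 0 then PySem.Int.bxor x 283 else x
      (e, l, x))
    ([], PySem.Dict.empty, 1)

-- _LOG[num] / _EXP[idx]: KeyError/IndexError are impossible on Pre_ (keys 1..255 all present,
-- index is in 0..254), so the .getD 0 default is never taken there.
def multiplication_GF28_alt (num1 : Int) (num2 : Int) : Int :=
  if num1 = 0 ∨ num2 = 0 then 0
  else
    let l1 := (gfInit.2.1.get? num1).getD 0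
    let l2 := (gfInit.2.1.get? num2).getD 0
    (PySem.List.pyGet? gfInit.1 (PySem.Int.mod (l1 + l2) 255)).getD 0

-- ===== PRECONDITION & SPEC =====
-- Pre_ excludes non-byte inputs: for num1 ≥ 256, num2 ≥ 256 or num2 < 0 A's padding loop never
-- terminates, and for -128 < num1 < 0 A returns a value that is an accident of padding the
-- string 'b…' produced by bin(num1)[2:] (e.g. A(-5,3) = 15), which B does not reproduce.
def Pre_multiplication_GF28 (num1 : Int) (num2 : Int) : Prop :=
  0 ≤ num1 ∧ num1 ≤ 255 ∧ 0 ≤ num2 ∧ num2 ≤ 255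
instance (num1 : Int) (num2 : Int) : Decidable (Pre_multiplication_GF28 num1 num2) := by
  unfold Pre_multiplication_GF28; infer_instance
def pvWitness_multiplication_GF28 : Int × Int := (3, 7)

def Spec_multiplication_GF28 (num1 : Int) (num2 : Int) (out : Int) : Prop := out = multiplication_GF28_alt num1 num2
instance (num1 : Int) (num2 : Int) (out : Int) : Decidable (Spec_multiplication_GF28 num1 num2 out) := by unfold Spec_multiplication_GF28; infer_instance

-- ===== CLAIM (what is proved, stated in full; the proofs are below) =====
def Claim_equal_multiplication_GF28 : Prop := ∀ (num1 : Int) (num2 : Int), Dom_multiplication_GF28 num1 num2 → Pre_multiplication_GF28 num1 num2 → Spec_multiplication_GF28 num1 num2 (multiplication_GF28 num1 num2)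

-- ===== LEMMAS AND PROOFS =====
set_option maxRecDepth 1000000

-- closed-form tables: EXPLIT/LOGPAIRS are gfInit's value; EXPN/LOGN pack the same tables as
-- base-256 digits of one natural number for cheap arithmetic lookup in the exhaustive check
def EXPLIT : List Int := [1, 3, 5, 15, 17, 51, 85, 255, 26, 46, 114, 150, 161, 248, 19, 53, 95, 225, 56, 72, 216, 115, 149, 164, 247, 2, 6, 10, 30, 34, 102, 170, 229, 52, 92, 228, 55, 89, 235, 38, 106, 190, 217, 112, 144, 171, 230, 49, 83, 245, 4, 12, 20, 60, 68, 204, 79, 209, 104, 184, 211, 110, 178, 205, 76, 212, 103, 169, 224, 59, 77, 215, 98, 166, 241, 8, 24, 40, 120, 136, 131, 158, 185, 208, 107, 189, 220, 127, 129, 152, 179, 206, 73, 219, 118, 154, 181, 196, 87, 249, 16, 48, 80, 240, 11, 29, 39, 105, 187, 214, 97, 163, 254, 25, 43, 125, 135, 146, 173, 236, 47, 113, 147, 174, 233, 32, 96, 160, 251, 22, 58, 78, 210, 109, 183, 194, 93, 231, 50, 86, 250, 21, 63, 65, 195, 94, 226, 61, 71, 201, 64, 192, 91, 237, 44, 116,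 156, 191, 218, 117, 159, 186, 213, 100, 172, 239, 42, 126, 130, 157, 188, 223, 122, 142, 137, 128, 155, 182, 193, 88, 232, 35, 101, 175, 234, 37, 111, 177, 200, 67, 197, 84, 252, 31, 33, 99, 165, 244, 7, 9, 27, 45, 119, 153, 176, 203, 70, 202, 69, 207, 74, 222, 121, 139, 134, 145, 168, 227, 62, 66, 198, 81, 243, 14, 18, 54, 90, 238, 41, 123, 141, 140, 143, 138, 133, 148, 167, 242, 13, 23, 57, 75, 221, 124, 132, 151, 162, 253, 28, 36, 108, 180, 199, 82, 246]
def LOGPAIRS : List (Int × Int) := [(1, 0), (3, 1), (5, 2), (15, 3), (17, 4), (51, 5), (85, 6), (255, 7), (26, 8), (46, 9), (114, 10), (150, 11), (161, 12), (248, 13), (19, 14), (53, 15), (95, 16), (225, 17), (56, 18), (72, 19), (216, 20), (115, 21), (149, 22), (164, 23), (247, 24), (2, 25), (6, 26), (10, 27), (30, 28), (34, 29), (102, 30), (170, 31), (229, 32), (52, 33), (92, 34), (228, 35), (55, 36), (89, 37), (235, 38), (38, 39), (106, 40), (190, 41), (217, 42), (112, 43), (144, 44), (171, 45), (230, 46),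 (49, 47), (83, 48), (245, 49), (4, 50), (12, 51), (20, 52), (60, 53), (68, 54), (204, 55), (79, 56), (209, 57), (104, 58), (184, 59), (211, 60), (110, 61), (178, 62), (205, 63), (76, 64), (212, 65), (103, 66), (169, 67), (224, 68), (59, 69), (77, 70), (215, 71), (98, 72), (166, 73), (241, 74), (8, 75), (24, 76), (40, 77), (120, 78), (136, 79), (131, 80), (158, 81), (185, 82), (208, 83), (107, 84), (189, 85), (220, 86), (127, 87), (129, 88), (152, 89), (179, 90), (206, 91), (73, 92), (219, 93), (118, 94), (154, 95), (181, 96), (196, 97), (87, 98), (249, 99), (16, 100), (48, 101), (80, 102), (240, 103), (11, 104), (29, 105), (39, 106), (105, 107), (187, 108), (214, 109), (97, 110), (163, 111), (254, 112), (25, 113), (43, 114), (125, 115), (135, 116), (146, 117), (173, 118), (236, 119), (47, 120), (113, 121), (147, 122), (174, 123), (233, 124), (32, 125), (96, 126), (160, 127), (251, 128), (22, 129), (58, 130), (78, 131), (210, 132), (109, 133), (183, 134), (194, 135), (93, 136), (231, 137), (50, 138), (86, 139), (250, 140), (21, 141), (63, 142), (65, 143), (195, 144), (94, 145), (226, 146),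 (61, 147), (71, 148), (201, 149), (64, 150), (192, 151), (91, 152), (237, 153), (44, 154), (116, 155), (156, 156), (191, 157), (218, 158), (117, 159), (159, 160), (186, 161), (213, 162), (100, 163), (172, 164), (239, 165), (42, 166), (126, 167), (130, 168), (157, 169), (188, 170), (223, 171), (122, 172), (142, 173), (137, 174), (128, 175), (155, 176), (182, 177), (193, 178), (88, 179), (232, 180), (35, 181), (101, 182), (175, 183), (234, 184), (37, 185), (111, 186), (177, 187), (200, 188), (67, 189), (197, 190), (84, 191), (252, 192), (31, 193), (33, 194), (99, 195), (165, 196), (244, 197), (7, 198), (9, 199), (27, 200), (45, 201), (119, 202), (153, 203), (176, 204), (203, 205), (70, 206), (202, 207), (69, 208), (207, 209), (74, 210), (222, 211), (121, 212), (139, 213), (134, 214), (145, 215), (168, 216), (227, 217), (62, 218), (66, 219), (198, 220), (81, 221), (243, 222), (14, 223), (18, 224), (54, 225), (90, 226), (238, 227), (41, 228), (123, 229), (141, 230), (140, 231), (143, 232), (138, 233), (133, 234), (148, 235), (167, 236), (242, 237), (13, 238), (23, 239), (57, 240), (75, 241), (221, 242), (124, 243), (132, 244), (151, 245), (162, 246),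 (253, 247), (28, 248), (36, 249), (108, 250), (180, 251), (199, 252), (82, 253), (246, 254)]
def EXPN : Nat := 121466575815500734415996836054882879791832871126464106601702187317037704638720699736399773789881350966450612456712855012027411276600174289287471020404625812305602624065235109912861702064162581238381248958448422203687095403783548669481020115429473714815130546491650907227391014769411226625179674495964331439187933946584331397333639979447433688574122779091165484305754955373075414835846686739481168846087332879005575464100018941681806164995707250399423063311368515928344698269234575261926727907427524598329539937222090466892085999338983806607642276495436692919915470849325341672618663070658392065151738926641076044545
def LOGN : Nat := 939374623831894136699086600277250597547650664638770418422125146541797353646788332867483593573384618611044815625336497665827114626705134492515730415652478061620339993830966980270842846318821775850471098591710629241171812800746666233448222972174585295916389942636813666312872914849454985560152530477328703759683306625234997237483834721220409437442253146756845415190424543171129629468776480674528486868811725071010351012234056630775688111116293610821126543142160426617079940511630006820862697466582575257349116925728488930366609138264019883664906661504235885380294353134295748489096855100647154935187045898006656778240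

-- branch-free one-step of the shift-and-reduce product on Nat: state (a, b, result)
def stp (s : Nat × Nat × Nat) : Nat × Nat × Nat :=
  (s.1 >>> 1, (s.2.1 <<< 1) ^^^ ((s.2.1 >>> 7) * 283), s.2.2 ^^^ ((s.1 &&& 1) * s.2.1))

def gloop : Nat → Nat × Nat × Nat → Nat × Nat × Nat
  | 0, s => s
  | m+1, s => gloop m (stp s)

def g8 (a b : Nat) : Nat := (stp (stp (stp (stp (stp (stp (stp (stp (a, b, 0))))))))).2.2

theorem g8_eq_gloop (a b : Nat) : g8 a b = (gloop 8 (a, b, 0)).2.2 := rfl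

def tformN (a b : Nat) : Nat :=
  if a = 0 ∨ b = 0 then 0
  else (EXPN >>> (8*((((LOGN >>> (8*a)) &&& 255) + ((LOGN >>> (8*b)) &&& 255)) % 255))) &&& 255

-- exhaustive check g8 = tformN over all 65536 byte pairs, in 16 linear chunks of 4096
def chkL (lo : Nat) : Nat → Bool
  | 0 => true
  | n+1 => if g8 ((lo + n) / 256) ((lo + n) % 256) == tformN ((lo + n) / 256) ((lo + n) % 256) then chkL lo n else false

set_option maxHeartbeats 4000000 in
theorem chkL_0 : chkL 0 4096 = true := by decide
set_option maxHeartbeats 4000000 in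
theorem chkL_1 : chkL 4096 4096 = true := by decide
set_option maxHeartbeats 4000000 in
theorem chkL_2 : chkL 8192 4096 = true := by decide
set_option maxHeartbeats 4000000 in
theorem chkL_3 : chkL 12288 4096 = true := by decide
set_option maxHeartbeats 4000000 in
theorem chkL_4 : chkL 16384 4096 = true := by decide
set_option maxHeartbeats 4000000 in
theorem chkL_5 : chkL 20480 4096 = true := by decide
set_option maxHeartbeats 4000000 in
theorem chkL_6 : chkL 24576 4096 = true := by decide
set_option maxHeartbeats 4000000 in
theorem chkL_7 : chkL 28672 4096 = true := by decide
set_option maxHeartbeats 4000000 in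
theorem chkL_8 : chkL 32768 4096 = true := by decide
set_option maxHeartbeats 4000000 in
theorem chkL_9 : chkL 36864 4096 = true := by decide
set_option maxHeartbeats 4000000 in
theorem chkL_10 : chkL 40960 4096 = true := by decide
set_option maxHeartbeats 4000000 in
theorem chkL_11 : chkL 45056 4096 = true := by decide
set_option maxHeartbeats 4000000 in
theorem chkL_12 : chkL 49152 4096 = true := by decide
set_option maxHeartbeats 4000000 in
theorem chkL_13 : chkL 53248 4096 = true := by decide
set_option maxHeartbeats 4000000 in
theorem chkL_14 : chkL 57344 4096 = true := by decide
set_option maxHeartbeats 4000000 in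
theorem chkL_15 : chkL 61440 4096 = true := by decide

theorem chkL_all : ∀ n lo, chkL lo n = true →
    ∀ i, lo ≤ i → i < lo + n → g8 (i / 256) (i % 256) = tformN (i / 256) (i % 256) := by
  intro n
  induction n with
  | zero => intro lo _ i _ _; omega
  | succ m ih =>
    intro lo h i h1 h2
    unfold chkL at h
    split at h
    · rename_i hc
      by_cases hi : i < lo + m
      · exact ih lo h i h1 hi
      · have : i = lo + m := by omega
        subst this
        simpa using hc
    · exact absurd h (by simp)

theorem all_pairs : ∀ i, i < 65536 → g8 (i / 256) (i % 256) = tformN (i / 256) (i % 256) := by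
  intro i hi
  by_cases h0 : i < 4096
  · exact chkL_all 4096 0 chkL_0 i (by omega) (by omega)
  by_cases h1 : i < 8192
  · exact chkL_all 4096 4096 chkL_1 i (by omega) (by omega)
  by_cases h2 : i < 12288
  · exact chkL_all 4096 8192 chkL_2 i (by omega) (by omega)
  by_cases h3 : i < 16384
  · exact chkL_all 4096 12288 chkL_3 i (by omega) (by omega)
  by_cases h4 : i < 20480
  · exact chkL_all 4096 16384 chkL_4 i (by omega) (by omega)
  by_cases h5 : i < 24576
  · exact chkL_all 4096 20480 chkL_5 i (by omega) (by omega)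
  by_cases h6 : i < 28672
  · exact chkL_all 4096 24576 chkL_6 i (by omega) (by omega)
  by_cases h7 : i < 32768
  · exact chkL_all 4096 28672 chkL_7 i (by omega) (by omega)
  by_cases h8 : i < 36864
  · exact chkL_all 4096 32768 chkL_8 i (by omega) (by omega)
  by_cases h9 : i < 40960
  · exact chkL_all 4096 36864 chkL_9 i (by omega) (by omega)
  by_cases h10 : i < 45056
  · exact chkL_all 4096 40960 chkL_10 i (by omega) (by omega)
  by_cases h11 : i < 49152
  · exact chkL_all 4096 45056 chkL_11 i (by omega) (by omega)
  by_cases h12 : i < 53248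
  · exact chkL_all 4096 49152 chkL_12 i (by omega) (by omega)
  by_cases h13 : i < 57344
  · exact chkL_all 4096 53248 chkL_13 i (by omega) (by omega)
  by_cases h14 : i < 61440
  · exact chkL_all 4096 57344 chkL_14 i (by omega) (by omega)
  · exact chkL_all 4096 61440 chkL_15 i (by omega) (by omega)

theorem g8_eq_tformN (a b : Fin 256) : g8 a.val b.val = tformN a.val b.val := by
  have h := all_pairs (a.val * 256 + b.val) (by omega)
  have h1 : (a.val * 256 + b.val) / 256 = a.val := by omega
  have h2 : (a.val * 256 + b.val) % 256 = b.val := by omega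
  rwa [h1, h2] at h

-- ===== A-side bridge =====
theorem bitC (a : Fin 256) : ∀ k : Fin 8,
    (PySem.List.pyGet? (int_bin (a.val : Int)) ((7 : Int) - (k.val : Int)) = some '1') ↔
      ((a.val >>> k.val) &&& 1 = 1) := by
  revert a; decide

theorem bitC' (a : Fin 256) (k : Nat) (hk : k < 8) :
    (PySem.List.pyGet? (int_bin (a.val : Int)) ((7 : Int) - (k : Int)) = some '1') ↔
      ((a.val >>> k) &&& 1 = 1) := bitC a ⟨k, hk⟩

theorem xtC : ∀ b : Fin 256,
    (if PySem.List.pyGet? (int_bin (b.val : Int)) 0 = some '1'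
      then PySem.Int.bxor (((b.val : Int)) <<< (1 : Nat)) 283
      else ((b.val : Int)) <<< (1 : Nat))
      = (((b.val <<< 1) ^^^ ((b.val >>> 7) * 283) : Nat) : Int) := by
  decide

theorem xtC' (b : Nat) (hb : b < 256) :
    (if PySem.List.pyGet? (int_bin (b : Int)) 0 = some '1'
      then PySem.Int.bxor (((b : Int)) <<< (1 : Nat)) 283
      else ((b : Int)) <<< (1 : Nat))
      = (((b <<< 1) ^^^ ((b >>> 7) * 283) : Nat) : Int) := xtC ⟨b, hb⟩

theorem xtLT : ∀ b : Fin 256, (b.val <<< 1) ^^^ ((b.val >>> 7) * 283) < 256 := by decide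

theorem loop_eq (a : Fin 256) : ∀ (m : Nat), m ≤ 8 → ∀ (res b : Nat), b < 256 →
    ((PySem.List.pyRange ((m : Int) - 1) (-1) (-1)).foldl (mulStep (int_bin (a.val : Int)))
        ((res : Int), (b : Int), int_bin (b : Int))).1
      = ((gloop m (a.val >>> (8 - m), b, res)).2.2 : Int) := by
  intro m
  induction m with
  | zero =>
    intro _ res b _
    rw [show (((0:Nat) : Int) - 1) = (-1 : Int) by norm_num,
        PySem.List.pyRange_neg_one_eq_nil (by norm_num)]
    rfl
  | succ m ih =>
    intro hm res b hb
    rw [show ((((m+1 : Nat)) : Int) - 1) = ((m : Nat) : Int) by push_cast; ring,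
        PySem.List.pyRange_neg_one_cons (by omega),
        List.foldl_cons]
    have hb' : (b <<< 1) ^^^ ((b >>> 7) * 283) < 256 := xtLT ⟨b, hb⟩
    have hiff := bitC' a (7 - m) (by omega)
    have hidx : ((7 : Int) - ((7 - m : Nat) : Int)) = ((m : Nat) : Int) := by omega
    rw [hidx] at hiff
    have hstep : mulStep (int_bin (a.val : Int)) ((res : Int), (b : Int), int_bin (b : Int)) ((m : Nat) : Int)
        = ((((res ^^^ (((a.val >>> (7 - m)) &&& 1) * b) : Nat)) : Int),
           (((b <<< 1) ^^^ ((b >>> 7) * 283) : Nat) : Int),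
           int_bin (((b <<< 1) ^^^ ((b >>> 7) * 283) : Nat) : Int)) := by
      simp only [mulStep]
      rw [xtC' b hb]
      simp only [hiff]
      by_cases hbit : (a.val >>> (7 - m)) &&& 1 = 1
      · simp only [hbit, if_true, one_mul, PySem.Int.bxor_natCast]
      · have h0 : (a.val >>> (7 - m)) &&& 1 = 0 := by
          have := Nat.and_one_is_mod (a.val >>> (7 - m)); omega
        simp [h0]
    rw [hstep]
    have h7 : 8 - (m + 1) = 7 - m := by omega
    rw [h7, show gloop (m+1) (a.val >>> (7 - m), b, res) = gloop m (stp (a.val >>> (7 - m), b, res)) from rfl]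
    have hstp : stp (a.val >>> (7 - m), b, res)
        = (a.val >>> (8 - m), (b <<< 1) ^^^ ((b >>> 7) * 283), res ^^^ (((a.val >>> (7 - m)) &&& 1) * b)) := by
      simp only [stp]
      rw [← Nat.shiftRight_add, show (7 - m) + 1 = 8 - m by omega]
    rw [hstp]
    exact ih (by omega) _ _ hb'

theorem A_eq_g8 (a b : Fin 256) :
    multiplication_GF28 (a.val : Int) (b.val : Int) = (g8 a.val b.val : Int) := by
  have h := loop_eq a 8 (by norm_num) 0 b.val b.isLt
  norm_num at h
  simp only [multiplication_GF28, g8_eq_gloop]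
  exact h

-- ===== B-side bridge =====
theorem gfInit_eq : gfInit = (EXPLIT, PySem.Dict.mk LOGPAIRS, 1) := by decide

theorem logC : ∀ n : Fin 256,
    (((PySem.Dict.mk LOGPAIRS).get? ((n.val : Nat) : Int)).getD 0) = (((LOGN >>> (8*n.val)) &&& 255 : Nat) : Int) := by
  decide

theorem logC' (v : Nat) (h : v < 256) :
    (((PySem.Dict.mk LOGPAIRS).get? ((v : Nat) : Int)).getD 0) = (((LOGN >>> (8*v)) &&& 255 : Nat) : Int) := logC ⟨v, h⟩

theorem expC : ∀ i : Fin 255,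
    ((PySem.List.pyGet? EXPLIT ((i.val : Nat) : Int)).getD 0) = (((EXPN >>> (8*i.val)) &&& 255 : Nat) : Int) := by
  decide

theorem expC' (v : Nat) (h : v < 255) :
    ((PySem.List.pyGet? EXPLIT ((v : Nat) : Int)).getD 0) = (((EXPN >>> (8*v)) &&& 255 : Nat) : Int) := expC ⟨v, h⟩

theorem B_eq_tformN (a b : Fin 256) :
    multiplication_GF28_alt (a.val : Int) (b.val : Int) = (tformN a.val b.val : Int) := by
  simp only [multiplication_GF28_alt, tformN, gfInit_eq]
  by_cases hz : a.val = 0 ∨ b.val = 0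
  · have hz2 : a = 0 ∨ b = 0 := by
      rcases hz with h | h
      · exact Or.inl (Fin.ext h)
      · exact Or.inr (Fin.ext h)
    simp [hz2]
  · have hz' : ¬ ((a.val : Int) = 0 ∨ (b.val : Int) = 0) := by
      simpa using hz
    simp only [hz, hz', if_false]
    rw [logC' a.val a.isLt, logC' b.val b.isLt]
    have hmod : PySem.Int.mod ((((LOGN >>> (8*a.val)) &&& 255 : Nat) : Int) + (((LOGN >>> (8*b.val)) &&& 255 : Nat) : Int)) 255
        = (((((LOGN >>> (8*a.val)) &&& 255) + ((LOGN >>> (8*b.val)) &&& 255)) % 255 : Nat) : Int) := by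
      rw [← Nat.cast_add]
      simp [PySem.Int.mod, Int.fmod_eq_emod]
    rw [hmod, expC' _ (Nat.mod_lt _ (by norm_num))]

-- ===== glue =====
theorem AB_eq (a b : Fin 256) :
    multiplication_GF28 (a.val : Int) (b.val : Int) = multiplication_GF28_alt (a.val : Int) (b.val : Int) := by
  rw [A_eq_g8, B_eq_tformN, g8_eq_tformN]

-- ===== VERDICT (by name: the statement is the Claim_ definition above) =====
theorem multiplication_GF28_spec : Claim_equal_multiplication_GF28 := by
  intro n1 n2 _ hp
  obtain ⟨h1, h2, h3, h4⟩ := hp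
  unfold Spec_multiplication_GF28
  have e1 : n1 = ((n1.toNat : Nat) : Int) := (Int.toNat_of_nonneg h1).symm
  have e2 : n2 = ((n2.toNat : Nat) : Int) := (Int.toNat_of_nonneg h3).symm
  rw [e1, e2]
  exact AB_eq ⟨n1.toNat, by omega⟩ ⟨n2.toNat, by omega⟩
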